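-- pv_equiv track=rewrite | github.com/kimhyunkwang/algorithm-study-02 | 4주차/4주차_튜터링/괄호 공장장 체셔.py | findBracket
-- ===== SOURCE A (Python) =====
-- def findBracket(b):
--     index, idx = [], -1
--     while True:
--         idx = b.find('()', idx+1)
--         if idx == -1:
--             break
--         index.append((idx, idx+1))
--     return index
-- ===== SOURCE B (Python) =====
-- def findBracket(b):
--     opens = {i for i, c in enumerate(b) if c == '('}
--     closes = {i - 1 for i, c in enumerate(b) if c == ')'}
--     return [(i, i + 1) for i in sorted(opens & closes)]
-- ===== Notes on version B (the rewrite author's own statement) =====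
-- stated objective: alternative
-- what changed: Replaces A's str.find jump-to-next-match while-loop by a staged set algorithm: build the set of indices of '(' and the set of indices one left of each ')', intersect the two sets, and emit the sorted intersection as (i, i+1) pairs.
import Mathlib
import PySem

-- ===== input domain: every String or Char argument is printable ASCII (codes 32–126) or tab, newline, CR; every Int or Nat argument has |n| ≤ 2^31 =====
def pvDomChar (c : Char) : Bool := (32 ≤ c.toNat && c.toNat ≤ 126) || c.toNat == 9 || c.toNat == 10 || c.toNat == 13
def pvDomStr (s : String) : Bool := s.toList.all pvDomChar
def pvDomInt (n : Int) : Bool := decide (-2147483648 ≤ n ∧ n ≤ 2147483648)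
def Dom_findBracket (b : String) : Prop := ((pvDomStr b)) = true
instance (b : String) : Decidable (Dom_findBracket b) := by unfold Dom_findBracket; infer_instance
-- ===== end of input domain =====

-- B replaces A's str.find jump-to-next-match while-loop by a staged set algorithm:
-- intersect the set of '('-indices with the set of indices one left of each ')', then sort.

-- ===== PORT A =====
-- A's while-loop: idx = b.find('()', idx+1); stop at -1, else record (idx, idx+1).
-- The Nat parameter `start` is Python's idx+1 (always ≥ 0); the proof argument `h`
-- only justifies termination and does not change the computation.
def findBracketGo (b : String) (start : Nat) (acc : List (Int × Int))
    (h : start ≤ b.toList.length) : List (Int × Int) :=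
  let idx := PySem.Str.findFrom b "()" (start : Int)
  if hi : idx = -1 then acc
  else
    have hEq : PySem.Chars.findFrom b.toList "()".toList (start : Int) none = idx :=
      (PySem.Str.findFrom_eq b "()" (start : Int) none).symm
    have hne : PySem.Chars.findFrom b.toList "()".toList (start : Int) none ≠ -1 := by
      rw [hEq]; exact hi
    have hspec := PySem.Chars.findFrom_natCast_spec b.toList "()".toList start h hne
    have hkey : start ≤ idx.toNat ∧ idx.toNat + 1 ≤ b.toList.length := by
      rw [hEq] at hspec
      have hlen := hspec.2.1.length_le
      have hpl : ("()".toList).length = 2 := rfl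
      have h1 := hspec.1
      simp only [List.length_drop, hpl] at hlen
      omega
    findBracketGo b (idx.toNat + 1) (acc ++ [(idx, idx + 1)]) hkey.2
termination_by b.toList.length - start
decreasing_by omega

def findBracket (b : String) : List (Int × Int) :=
  findBracketGo b 0 [] (Nat.zero_le _)

-- ===== PORT B =====
-- opens = {i for i, c in enumerate(b) if c == '('}
-- closes = {i - 1 for i, c in enumerate(b) if c == ')'}
-- return [(i, i + 1) for i in sorted(opens & closes)]
-- (sorted over a set without a key: result independent of Python's hash order)
def findBracket_alt (b : String) : List (Int × Int) :=
  let opens : PySem.Set Int := PySem.Set.ofList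
    (((PySem.List.enumerate b.toList 0).filter (fun p => p.2 == '(')).map (fun p => p.1))
  let closes : PySem.Set Int := PySem.Set.ofList
    (((PySem.List.enumerate b.toList 0).filter (fun p => p.2 == ')')).map (fun p => p.1 - 1))
  (PySem.List.sorted (PySem.Set.inter opens closes) (fun x => x)).map (fun i => (i, i + 1))

-- ===== PRECONDITION & SPEC =====
def Spec_findBracket (b : String) (out : List (Int × Int)) : Prop := out = findBracket_alt b
instance (b : String) (out : List (Int × Int)) : Decidable (Spec_findBracket b out) := by unfold Spec_findBracket; infer_instance

-- ===== CLAIM =====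
def Claim_equal_findBracket : Prop := ∀ (b : String), Dom_findBracket b → Spec_findBracket b (findBracket b)

-- ===== LEMMAS AND PROOFS =====

-- canonical position-by-position description of the matches of '()' in l, first index i
def canonPairs : List Char → Int → List (Int × Int)
  | [], _ => []
  | c :: rest, i =>
      (if c = '(' ∧ rest.head? = some ')' then [(i, i + 1)] else []) ++ canonPairs rest (i + 1)

theorem pat_prefix_iff (l : List Char) :
    "()".toList <+: l ↔ ∃ rest, l = '(' :: ')' :: rest := by
  constructor
  · rintro ⟨t, ht⟩
    exact ⟨t, by simpa using ht.symm⟩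
  · rintro ⟨rest, rfl⟩
    exact ⟨rest, rfl⟩

theorem canonPairs_step (s : List Char) (k : Nat) :
    canonPairs (s.drop k) k =
      (if "()".toList <+: s.drop k then [((k : Int), (k : Int) + 1)] else []) ++
        canonPairs (s.drop (k + 1)) ((k : Int) + 1) := by
  have hdrop : s.drop (k + 1) = (s.drop k).tail := by
    rw [← List.drop_drop]; simp
  rw [hdrop]
  cases hsk : s.drop k with
  | nil => simp [canonPairs]
  | cons c rest =>
    simp only [canonPairs, List.tail_cons]
    congr 1
    by_cases hp : "()".toList <+: c :: rest
    · obtain ⟨r, hr⟩ := (pat_prefix_iff _).1 hp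
      cases hr
      rw [if_pos ⟨rfl, rfl⟩, if_pos hp]
    · have : ¬ (c = '(' ∧ rest.head? = some ')') := by
        intro ⟨h1, h2⟩
        cases rest with
        | nil => simp at h2
        | cons c2 r2 =>
          simp at h2
          exact hp ((pat_prefix_iff _).2 ⟨r2, by rw [h1, h2]⟩)
      rw [if_neg this, if_neg hp]

theorem canonPairs_skip (s : List Char) (start r : Nat) (hsr : start ≤ r)
    (hno : ∀ i, start ≤ i → i < r → ¬ "()".toList <+: s.drop i) :
    canonPairs (s.drop start) start = canonPairs (s.drop r) r := by
  obtain ⟨d, rfl⟩ : ∃ d, r = start + d := ⟨r - start, by omega⟩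
  clear hsr
  induction d generalizing start with
  | zero => rfl
  | succ d ih =>
    have h0 : ¬ "()".toList <+: s.drop start := hno start le_rfl (by omega)
    have hr : start + (d + 1) = (start + 1) + d := by omega
    rw [hr, ← ih (start + 1) (fun i h1 h2 => hno i (by omega) (by omega))]
    rw [canonPairs_step s start, if_neg h0, List.nil_append]
    rw [show ((start : Int) + 1) = ((start + 1 : Nat) : Int) by push_cast; ring]

theorem canonPairs_nil_of_no_match (l : List Char) (i : Int)
    (hno : ∀ j, ¬ "()".toList <+: l.drop j) :
    canonPairs l i = [] := by
  induction l generalizing i with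
  | nil => rfl
  | cons c rest ih =>
    have h0 : ¬ (c = '(' ∧ rest.head? = some ')') := by
      intro ⟨h1, h2⟩
      cases rest with
      | nil => simp at h2
      | cons c2 r2 =>
        simp at h2
        exact hno 0 (by
          simp only [List.drop_zero]
          exact (pat_prefix_iff _).2 ⟨r2, by rw [h1, h2]⟩)
    simp only [canonPairs, h0, if_false, List.nil_append]
    exact ih _ (fun j => hno (j + 1))

theorem findBracketGo_eq_canon (b : String) (start : Nat) (acc : List (Int × Int))
    (h : start ≤ b.toList.length) :
    findBracketGo b start acc h = acc ++ canonPairs (b.toList.drop start) start := by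
  rw [findBracketGo]
  set idx := PySem.Str.findFrom b "()" (start : Int) with hidx
  by_cases hi : idx = -1
  · rw [dif_pos hi]
    have hni : ¬ "()".toList <:+: b.toList.drop start := by
      rw [← PySem.Chars.findFrom_natCast_eq_neg_one_iff b.toList "()".toList start h]
      simpa [PySem.Str.findFrom_eq, hidx] using hi
    have : canonPairs (b.toList.drop start) start = [] := by
      apply canonPairs_nil_of_no_match
      intro j hj
      exact hni (hj.isInfix.trans (List.drop_suffix j _).isInfix)
    simp [this]
  · rw [dif_neg hi]
    have hne : PySem.Chars.findFrom b.toList "()".toList (start : Int) none ≠ -1 := by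
      simpa [PySem.Str.findFrom_eq, hidx] using hi
    have hspec := PySem.Chars.findFrom_natCast_spec b.toList "()".toList start h hne
    have hEq : PySem.Chars.findFrom b.toList "()".toList (start : Int) none = idx := by
      rw [hidx, PySem.Str.findFrom_eq]
    rw [hEq] at hspec
    have hlen := hspec.2.1.length_le
    have hpl : ("()".toList).length = 2 := rfl
    simp only [List.length_drop, hpl] at hlen
    have hs1 := hspec.1
    have hkey : start ≤ idx.toNat ∧ idx.toNat + 1 ≤ b.toList.length := by omega
    have hidxnn : 0 ≤ idx := le_trans (by positivity) hspec.1
    rw [findBracketGo_eq_canon b (idx.toNat + 1) _ hkey.2]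
    have hskip : canonPairs (b.toList.drop start) start
        = canonPairs (b.toList.drop idx.toNat) idx.toNat := by
      apply canonPairs_skip _ _ _ hkey.1
      intro i h1 h2
      exact hspec.2.2 i h1 h2
    have hstep := canonPairs_step b.toList idx.toNat
    rw [if_pos hspec.2.1] at hstep
    rw [hskip, hstep]
    have h1 : ((idx.toNat : Nat) : Int) = idx := Int.toNat_of_nonneg hidxnn
    have hEq' : PySem.Chars.findFrom b.toList ['(', ')'] (start : Int) none = idx := hEq
    simp [h1, hEq']
termination_by b.toList.length - start
decreasing_by omega

-- the list of '('-indices of l, enumeration starting at s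
def opensL (l : List Char) (s : Int) : List Int :=
  ((PySem.List.enumerate l s).filter (fun p => p.2 == '(')).map (fun p => p.1)

-- the list of (index-1) values of the ')'-positions of l, enumeration starting at s
def closesL (l : List Char) (s : Int) : List Int :=
  ((PySem.List.enumerate l s).filter (fun p => p.2 == ')')).map (fun p => p.1 - 1)

theorem opensL_pairwise (l : List Char) (s : Int) : (opensL l s).Pairwise (· < ·) := by
  unfold opensL
  rw [List.pairwise_map]
  exact (PySem.List.pairwise_lt_enumerate l s).filter _

theorem closesL_pairwise (l : List Char) (s : Int) : (closesL l s).Pairwise (· < ·) := by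
  unfold closesL
  rw [List.pairwise_map]
  exact ((PySem.List.pairwise_lt_enumerate l s).filter _).imp (by intro a b h; omega)

theorem opensL_cons (c : Char) (rest : List Char) (s : Int) :
    opensL (c :: rest) s = (if c = '(' then [s] else []) ++ opensL rest (s + 1) := by
  unfold opensL
  rw [PySem.List.enumerate_cons]
  by_cases hc : c = '('
  · rw [List.filter_cons_of_pos (by simp [hc]), if_pos hc]; simp
  · rw [List.filter_cons_of_neg (by simp [hc]), if_neg hc]; simp

theorem mem_closesL_iff (l : List Char) (j : Int) :
    j ∈ closesL l 0 ↔ ∃ (k : Nat) (h : k < l.length), l[k] = ')' ∧ j = (k : Int) - 1 := by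
  unfold closesL
  simp only [List.mem_map, List.mem_filter, PySem.List.mem_enumerate_iff]
  constructor
  · rintro ⟨p, ⟨⟨k, hk, rfl⟩, hp⟩, rfl⟩
    simp at hp
    exact ⟨k, hk, hp, by push_cast; ring⟩
  · rintro ⟨k, hk, hc, rfl⟩
    exact ⟨((k : Int), ')'), ⟨⟨k, hk, by simp [hc]⟩, by simp⟩, by push_cast; ring⟩

-- at position n with full.drop n = c :: rest: (n : Int) ∈ closes ↔ rest starts with ')'
theorem mem_closes_at (full : List Char) (n : Nat) (c : Char) (rest : List Char)
    (hd : full.drop n = c :: rest) :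
    ((n : Int) ∈ closesL full 0) ↔ rest.head? = some ')' := by
  have hget : full[n + 1]? = rest[0]? := by
    have h1 : (List.drop n full)[1]? = full[n + 1]? := List.getElem?_drop
    rw [hd] at h1
    simpa using h1.symm
  rw [mem_closesL_iff]
  constructor
  · rintro ⟨k, hk, hc, hnk⟩
    have : k = n + 1 := by omega
    subst this
    rw [List.head?_eq_getElem?, ← hget, List.getElem?_eq_getElem hk, hc]
  · intro hh
    rw [List.head?_eq_getElem?] at hh
    rw [hh] at hget
    have hk : n + 1 < full.length := by
      by_contra hcon
      rw [List.getElem?_eq_none_iff.mpr (by omega)] at hget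
      simp at hget
    refine ⟨n + 1, hk, ?_, by push_cast; ring⟩
    rw [List.getElem?_eq_getElem hk] at hget
    simpa using hget

-- the core correspondence: filtered '('-indices from position n = canonPairs from n
theorem inter_eq_canon (full : List Char) (n : Nat) :
    ((opensL (full.drop n) (n : Int)).filter
        (fun j => (closesL full 0).contains j)).map (fun i => (i, i + 1))
      = canonPairs (full.drop n) (n : Int) := by
  cases hd : full.drop n with
  | nil => simp [opensL, canonPairs, PySem.List.enumerate_nil]
  | cons c rest =>
    have hn : n < full.length := by
      by_contra hcon
      rw [List.drop_eq_nil_of_le (by omega)] at hd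
      simp at hd
    have hrest : full.drop (n + 1) = rest := by
      rw [← List.drop_drop]
      simp [hd]
    have ih := inter_eq_canon full (n + 1)
    rw [hrest] at ih
    rw [opensL_cons, List.filter_append, List.map_append]
    rw [show ((n : Int) + 1) = ((n + 1 : Nat) : Int) by push_cast; ring, ih]
    show _ = canonPairs (c :: rest) (n : Int)
    simp only [canonPairs]
    congr 1
    · by_cases hc : c = '('
      · rw [if_pos hc]
        by_cases hm : (n : Int) ∈ closesL full 0
        · rw [List.filter_cons_of_pos (by simpa using hm)]
          rw [if_pos ⟨hc, (mem_closes_at full n c rest hd).1 hm⟩]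
          simp
        · rw [List.filter_cons_of_neg (by simpa using hm)]
          rw [if_neg (fun h => hm ((mem_closes_at full n c rest hd).2 h.2))]
          simp
      · rw [if_neg hc, if_neg (fun h => hc h.1)]
        simp
termination_by full.length - n
decreasing_by omega

theorem findBracket_spec : Claim_equal_findBracket := by
  unfold Claim_equal_findBracket
  intro b _
  unfold Spec_findBracket findBracket findBracket_alt
  rw [findBracketGo_eq_canon, List.nil_append, List.drop_zero]
  have hopens : PySem.Set.ofList (opensL b.toList 0) = opensL b.toList 0 :=
    PySem.Set.ofList_eq_self_of_nodup _ ((opensL_pairwise b.toList 0).imp ne_of_lt)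
  have hcloses : PySem.Set.ofList (closesL b.toList 0) = closesL b.toList 0 :=
    PySem.Set.ofList_eq_self_of_nodup _ ((closesL_pairwise b.toList 0).imp ne_of_lt)
  symm
  show (PySem.List.sorted (PySem.Set.inter
      (PySem.Set.ofList (opensL b.toList 0)) (PySem.Set.ofList (closesL b.toList 0)))
      (fun x => x)).map (fun i => (i, i + 1)) = _
  rw [hopens, hcloses]
  have hinter : PySem.Set.inter (opensL b.toList 0) (closesL b.toList 0)
      = (opensL b.toList 0).filter (fun j => (closesL b.toList 0).contains j) := rfl
  rw [hinter]
  rw [PySem.List.sorted_eq_self_of_pairwise _ _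
    (((opensL_pairwise b.toList 0).filter _).imp le_of_lt)]
  have := inter_eq_canon b.toList 0
  rw [List.drop_zero] at this
  exact_mod_cast this
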